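-- pv_equiv track=rewrite | github.com/devdanzin/labeille | src/labeille/yaml_lines.py | find_field_extent
-- ===== SOURCE A (Python) =====
-- def find_field_extent(lines: list[str], start: int) -> tuple[int, int]:
--     """Find the start and end (exclusive) line indices for a field.
--
--     Includes the key line and any continuation lines (indented sub-values
--     for dicts/lists).
--
--     Args:
--         lines: The file lines.
--         start: The line index of the field key.
--
--     Returns:
--         A ``(start, end)`` tuple where ``end`` is exclusive.
--     """
--     key_line = lines[start]
--     colon_idx = key_line.index(":")
--     after_colon = key_line[colon_idx + 1 :].strip()
--     is_block = after_colon == "" or after_colon.startswith("#")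
--
--     end = start + 1
--     if is_block:
--         # Block-style value: include indented continuation lines.
--         while end < len(lines):
--             line = lines[end]
--             if line.strip() == "":
--                 # Blank line might be mid-block or trailing — peek ahead.
--                 # If the next non-blank line is indented, it's mid-block.
--                 peek = end + 1
--                 while peek < len(lines) and lines[peek].strip() == "":
--                     peek += 1
--                 if peek < len(lines) and lines[peek][0] in (" ", "\t"):
--                     end = peek  # skip blank lines within block
--                     continue
--                 else:
--                     break  # trailing blank line, not part of block
--             if line[0] in (" ", "\t"):
--                 end += 1
--                 continue
--             if line.startswith("- "):
--                 end += 1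
--                 continue
--             break
--     # For scalar fields, extent is just the single line.
--     # Don't consume trailing blank lines.
--
--     return (start, end)
-- ===== SOURCE B (Python) =====
-- def find_field_extent(lines: list[str], start: int) -> tuple[int, int]:
--     """Find the start and end (exclusive) line indices for a field.
--
--     Single flat scan: blanks are skipped without committing; the end is the
--     last confirmed position (one past the last continuation line committed).
--     """
--     key_line = lines[start]
--     colon_idx = key_line.index(":")
--     after_colon = key_line[colon_idx + 1:].strip()
--     if after_colon != "" and not after_colon.startswith("#"):
--         return (start, start + 1)
--
--     confirmed = start + 1
--     gap = False
--     for i in range(start + 1, len(lines)):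
--         line = lines[i]
--         if line.strip() == "":
--             gap = True
--         elif line[0] in (" ", "\t"):
--             confirmed = i + 1
--             gap = False
--         elif line.startswith("- ") and not gap:
--             confirmed = i + 1
--         else:
--             break
--     return (start, confirmed)
-- ===== Notes on version B (the rewrite author's own statement) =====
-- stated objective: simpler
-- what changed: Replaces A's nested blank-line peek loop (look-ahead over blank runs, cursor jumps) with a single flat scan that skips blanks without committing and keeps a deferred last-confirmed-end accumulator with a gap flag.
import Mathlib
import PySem

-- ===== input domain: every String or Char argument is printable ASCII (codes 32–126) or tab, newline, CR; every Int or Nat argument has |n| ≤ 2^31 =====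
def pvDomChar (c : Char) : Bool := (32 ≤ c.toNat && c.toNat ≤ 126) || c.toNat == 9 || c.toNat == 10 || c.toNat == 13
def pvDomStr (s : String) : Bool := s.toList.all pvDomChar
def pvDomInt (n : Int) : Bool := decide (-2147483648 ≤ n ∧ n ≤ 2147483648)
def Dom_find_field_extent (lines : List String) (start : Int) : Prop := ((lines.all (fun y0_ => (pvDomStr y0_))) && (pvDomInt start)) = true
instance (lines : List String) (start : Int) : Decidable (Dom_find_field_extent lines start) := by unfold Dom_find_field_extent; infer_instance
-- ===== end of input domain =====

-- B replaces A's nested blank-line peek loop by one flat scan that defers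
-- committing the end until a continuation line confirms it (objective: simpler).

-- shared indexing helper: lines[i] (under Pre_ every reached index is in range, so the default is never used)
def pyLine (lines : List String) (i : Int) : String := PySem.List.pyGetD lines i ""

-- ===== PORT A =====
-- inner peek loop: while peek < len(lines) and lines[peek].strip() == "": peek += 1
def findPeekA (lines : List String) (peek : Int) : Nat → Int
  | 0 => peek
  | fuel + 1 =>
    if peek < (lines.length : Int) ∧ PySem.Str.strip (pyLine lines peek) = "" then
      findPeekA lines (peek + 1) fuel
    else peek

-- outer while loop over the cursor `end` (fuel ≥ len(lines) - end makes it exact)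
def findLoopA (lines : List String) (e : Int) : Nat → Int
  | 0 => e
  | fuel + 1 =>
    if e < (lines.length : Int) then
      let line := pyLine lines e
      if PySem.Str.strip line = "" then
        let peek := findPeekA lines (e + 1) fuel
        if peek < (lines.length : Int) ∧
            (PySem.Str.pyGet? (pyLine lines peek) 0 = some ' ' ∨
             PySem.Str.pyGet? (pyLine lines peek) 0 = some '\t') then
          findLoopA lines peek fuel
        else e
      else if PySem.Str.pyGet? line 0 = some ' ' ∨ PySem.Str.pyGet? line 0 = some '\t' then
        findLoopA lines (e + 1) fuel
      else if PySem.Str.startswith line "- " then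
        findLoopA lines (e + 1) fuel
      else e
    else e

def find_field_extent (lines : List String) (start : Int) : Int × Int :=
  let key_line := pyLine lines start
  -- key_line.index(":"): under Pre_ the colon is present, so .index = .find
  let colon_idx := PySem.Str.find key_line ":"
  let after_colon := PySem.Str.strip (PySem.Str.slice key_line (some (colon_idx + 1)) none)
  let is_block := after_colon = "" ∨ PySem.Str.startswith after_colon "#"
  let e := start + 1
  if is_block then
    (start, findLoopA lines e (((lines.length : Int) - start).toNat))
  else
    (start, e)

-- ===== PORT B =====
-- flat scan over range(start+1, len(lines)) with (confirmed, gap) state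
def scanB (lines : List String) : List Int → Int → Bool → Int
  | [], confirmed, _ => confirmed
  | i :: rest, confirmed, gap =>
    let line := pyLine lines i
    if PySem.Str.strip line = "" then
      scanB lines rest confirmed true
    else if PySem.Str.pyGet? line 0 = some ' ' ∨ PySem.Str.pyGet? line 0 = some '\t' then
      scanB lines rest (i + 1) false
    else if PySem.Str.startswith line "- " ∧ gap = false then
      scanB lines rest (i + 1) gap
    else confirmed

def find_field_extent_alt (lines : List String) (start : Int) : Int × Int :=
  let key_line := pyLine lines start
  let colon_idx := PySem.Str.find key_line ":"
  let after_colon := PySem.Str.strip (PySem.Str.slice key_line (some (colon_idx + 1)) none)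
  if after_colon ≠ "" ∧ ¬ PySem.Str.startswith after_colon "#" then
    (start, start + 1)
  else
    (start, scanB lines (PySem.List.pyRange (start + 1) (lines.length : Int) 1) (start + 1) false)

-- ===== PRECONDITION & SPEC =====
-- Pre_ excludes exactly the raising inputs: lines[start] out of range (IndexError) or no ':' in it (ValueError)
def Pre_find_field_extent (lines : List String) (start : Int) : Prop :=
  PySem.Raise.InRange lines.length start ∧ PySem.Str.isIn ":" (pyLine lines start) = true
instance (lines : List String) (start : Int) : Decidable (Pre_find_field_extent lines start) := by
  unfold Pre_find_field_extent; infer_instance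

def pvWitness_find_field_extent : List String × Int := (["key:", "  sub: 1"], 0)

def Spec_find_field_extent (lines : List String) (start : Int) (out : Int × Int) : Prop := out = find_field_extent_alt lines start
instance (lines : List String) (start : Int) (out : Int × Int) : Decidable (Spec_find_field_extent lines start out) := by unfold Spec_find_field_extent; infer_instance

-- ===== CLAIM (what is proved, stated in full; the proofs are below) =====
def Claim_equal_find_field_extent : Prop := ∀ (lines : List String) (start : Int), Dom_find_field_extent lines start → Pre_find_field_extent lines start → Spec_find_field_extent lines start (find_field_extent lines start)

-- ===== LEMMAS AND PROOFS =====

lemma peekA_spec (lines : List String) : ∀ (fuel : Nat) (p : Int),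
    (lines.length : Int) ≤ p + fuel → p ≤ (lines.length : Int) →
    p ≤ findPeekA lines p fuel ∧ findPeekA lines p fuel ≤ (lines.length : Int) ∧
    (∀ i, p ≤ i → i < findPeekA lines p fuel → PySem.Str.strip (pyLine lines i) = "") ∧
    (findPeekA lines p fuel < (lines.length : Int) → ¬ PySem.Str.strip (pyLine lines (findPeekA lines p fuel)) = "") := by
  intro fuel
  induction fuel with
  | zero =>
    intro p hf hp
    simp only [findPeekA]
    refine ⟨le_refl _, hp, ?_, ?_⟩
    · intro i h1 h2; omega
    · intro hlt; omega
  | succ fuel ih =>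
    intro p hf hp
    simp only [findPeekA]
    split
    · rename_i hcond
      have hrec := ih (p + 1) (by push_cast at hf ⊢; omega) (by omega)
      refine ⟨by omega, hrec.2.1, ?_, hrec.2.2.2⟩
      intro i h1 h2
      rcases eq_or_lt_of_le h1 with h | h
      · exact h ▸ hcond.2
      · exact hrec.2.2.1 i (by omega) h2
    · rename_i hcond
      refine ⟨le_refl _, hp, ?_, ?_⟩
      · intro i h1 h2; omega
      · intro hlt hb
        exact hcond ⟨hlt, hb⟩

lemma scanB_blanks (lines : List String) : ∀ (k : Nat) (e p c : Int),
    e ≤ p → p ≤ (lines.length : Int) → p - e ≤ (k : Int) →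
    (∀ i, e ≤ i → i < p → PySem.Str.strip (pyLine lines i) = "") →
    scanB lines (PySem.List.pyRange e (lines.length : Int) 1) c true =
    scanB lines (PySem.List.pyRange p (lines.length : Int) 1) c true := by
  intro k
  induction k with
  | zero =>
    intro e p c h1 h2 h3 _
    have : e = p := by omega
    rw [this]
  | succ k ih =>
    intro e p c h1 h2 h3 hb
    rcases eq_or_lt_of_le h1 with h | h
    · rw [h]
    · rw [PySem.List.pyRange_one_cons (by omega : e < (lines.length : Int))]
      simp only [scanB]
      have hbe : PySem.Str.strip (pyLine lines e) = "" := hb e le_rfl h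
      rw [if_pos hbe]
      exact ih (e + 1) p c (by omega) h2 (by push_cast at h3 ⊢; omega) (fun i hi1 hi2 => hb i (by omega) hi2)

lemma main_loop (lines : List String) : ∀ (fuel : Nat) (e : Int),
    (lines.length : Int) ≤ e + fuel →
    findLoopA lines e fuel = scanB lines (PySem.List.pyRange e (lines.length : Int) 1) e false := by
  intro fuel
  induction fuel using Nat.strong_induction_on with
  | _ fuel ih =>
    intro e hf
    by_cases hE : e < (lines.length : Int)
    · cases fuel with
      | zero => exfalso; push_cast at hf; omega
      | succ fuel' =>
        simp only [findLoopA]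
        rw [if_pos hE, PySem.List.pyRange_one_cons hE]
        simp only [scanB]
        by_cases hb : PySem.Str.strip (pyLine lines e) = ""
        · rw [if_pos hb, if_pos hb]
          have hq := peekA_spec lines fuel' (e + 1) (by push_cast at hf ⊢; omega) (by omega)
          set q := findPeekA lines (e + 1) fuel' with hqdef
          have hRB : scanB lines (PySem.List.pyRange (e + 1) (lines.length : Int) 1) e true =
              scanB lines (PySem.List.pyRange q (lines.length : Int) 1) e true :=
            scanB_blanks lines (q - (e + 1)).toNat (e + 1) q e hq.1 hq.2.1 (by omega) hq.2.2.1
          rw [hRB]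
          by_cases hc : q < (lines.length : Int) ∧ (PySem.Str.pyGet? (pyLine lines q) 0 = some ' ' ∨ PySem.Str.pyGet? (pyLine lines q) 0 = some '\t')
          · rw [if_pos hc]
            rw [PySem.List.pyRange_one_cons hc.1]
            simp only [scanB]
            have hnb : ¬ PySem.Str.strip (pyLine lines q) = "" := hq.2.2.2 hc.1
            rw [if_neg hnb, if_pos hc.2]
            cases fuel' with
            | zero => exfalso; push_cast at hf; omega
            | succ f2 =>
              simp only [findLoopA]
              rw [if_pos hc.1]
              simp only [if_neg hnb]
              rw [if_pos hc.2]
              exact ih f2 (by omega) (q + 1) (by push_cast at hf ⊢; omega)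
          · rw [if_neg hc]
            rcases eq_or_lt_of_le hq.2.1 with h | h
            · rw [h, PySem.List.pyRange_one_eq_nil le_rfl]
              simp only [scanB]
            · have hni : ¬ (PySem.Str.pyGet? (pyLine lines q) 0 = some ' ' ∨ PySem.Str.pyGet? (pyLine lines q) 0 = some '\t') := fun hi => hc ⟨h, hi⟩
              rw [PySem.List.pyRange_one_cons h]
              simp only [scanB]
              have hnb : ¬ PySem.Str.strip (pyLine lines q) = "" := hq.2.2.2 h
              rw [if_neg hnb, if_neg hni, if_neg (by simp : ¬ (PySem.Str.startswith (pyLine lines q) "- " = true ∧ true = false))]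
        · rw [if_neg hb, if_neg hb]
          by_cases hi : PySem.Str.pyGet? (pyLine lines e) 0 = some ' ' ∨ PySem.Str.pyGet? (pyLine lines e) 0 = some '\t'
          · rw [if_pos hi, if_pos hi]
            exact ih fuel' (by omega) (e + 1) (by push_cast at hf ⊢; omega)
          · rw [if_neg hi, if_neg hi]
            by_cases hd : PySem.Str.startswith (pyLine lines e) "- " = true
            · rw [if_pos hd, if_pos ⟨hd, trivial⟩]
              exact ih fuel' (by omega) (e + 1) (by push_cast at hf ⊢; omega)
            · rw [if_neg hd, if_neg (fun h => hd h.1)]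
    · rw [PySem.List.pyRange_one_eq_nil (by omega)]
      cases fuel with
      | zero => simp only [findLoopA, scanB]
      | succ fuel' =>
        simp only [findLoopA, scanB]
        rw [if_neg hE]

-- ===== VERDICT (by name: the statement is the Claim_ definition above) =====
theorem find_field_extent_spec : Claim_equal_find_field_extent := by
  intro lines start _hdom _hpre
  unfold Spec_find_field_extent find_field_extent find_field_extent_alt
  dsimp only
  have hmain := main_loop lines (((lines.length : Int) - start).toNat) (start + 1) (by omega)
  set key := pyLine lines start with hkey
  set ac := PySem.Str.strip (PySem.Str.slice key (some (PySem.Str.find key ":" + 1)) none) with hac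
  by_cases h : ac = "" ∨ PySem.Str.startswith ac "#" = true
  · have h2 : ¬ (ac ≠ "" ∧ ¬ PySem.Str.startswith ac "#" = true) :=
      fun hcon => h.elim (fun he => hcon.1 he) (fun hs => hcon.2 hs)
    rw [if_pos h, if_neg h2, hmain]
  · have h2 : ac ≠ "" ∧ ¬ PySem.Str.startswith ac "#" = true :=
      ⟨fun he => h (Or.inl he), fun hs => h (Or.inr hs)⟩
    rw [if_neg h, if_pos h2]
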